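-- pv_equiv track=rewrite | github.com/LorenzoGiacobbe/CodiceTesiMagistrale | correlations/correlations.py | create_input_list
-- ===== SOURCE A (Python) =====
-- def create_input_list(len):
-- 	il = list()
-- 	pre = list()
-- 	post = list()
-- 	x = list()
--
-- 	#ab = list()
-- 	#bit_diff = list()
-- 	#passaggio = list()
--
-- 	for i in range(0, len):
-- 		s = format(i, '04b')
-- 		il.append(s)
--
-- 	for i in range(len):
-- 		for j in range(len):
-- 			pre_a = int(il[i][0])
-- 			pre_b = int(il[i][1])
-- 			post_a = int(il[j][0])
-- 			post_b = int(il[j][1])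
-- 			#post_r1 = int(il[j][2])
-- 			#post_r2 = int(il[j][3])
--
-- 			pre.append(il[i])
-- 			post.append(il[j])
--
-- 			#x.append(my_xor(
-- 			#		my_xor(post_r1, post_r2),
-- 			#		my_and(post_a, post_b))
-- 			#)
--
-- 			#x.append(my_xor(pre_a+pre_b, post_a+post_b))
-- 			#x.append(my_xor((pre_a<<1)+pre_b, (post_a<<1)+post_b))
-- 			#x.append(my_and((pre_a<<1)+pre_b, (post_a<<1)+post_b))
--
-- 			#x.append(my_xor(my_and(pre_a, pre_b), my_and(post_a, post_b))) # --> più alto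
-- 			x.append(post_a)
--
-- 			#x.append(my_and(my_xor(pre_a, pre_b), my_xor(post_a, post_b)))
-- 			#x.append((my_and(pre_a, pre_b)<<1) + my_and(post_a, post_b))
-- 			#x.append(my_and(
-- 			#		my_xor(my_and(pre_a, pre_b), my_and(post_a, post_b)),
-- 			#		my_xor(my_and(pre_a, post_a), my_and(pre_b, post_b))
-- 			#	))
-- 			#x.append(my_xor(
-- 			#		my_xor(my_and(pre_a, pre_b), my_and(post_a, post_b)),
-- 			#		my_and(my_and(pre_a, post_a), my_and(pre_b, post_b))
-- 			#	))
-- 			#x.append(hamming_distance(my_and(pre_a, pre_b), my_and(post_a, post_b))) # -> stesso risultato del più alto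
-- 			#x.append(my_and(
-- 			#		hamming_distance(my_and(pre_a, pre_b), my_and(post_a, post_b)),
-- 			#		hamming_distance(my_and(pre_a, post_a), my_and(pre_b, post_b))
-- 			#))
--
--
-- 			#ab.append(((i//4)*16)+(j//4))
-- 			#bit_diff.append(diff(il[i], il[j]))
-- 			#passaggio.append((i*16)+j)
--
-- 	return pre, post, x #ab, passaggio, bit_diff
-- ===== SOURCE B (Python) =====
-- def create_input_list(len):
--     # single flat loop over cell index k; row/column recovered by divmod,
--     # instead of A's nested i/j loops over a prebuilt table
--     if len <= 0:
--         return [], [], []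
--     pre, post, x = [], [], []
--     for k in range(len * len):
--         i, j = divmod(k, len)
--         pre.append(format(i, '04b'))
--         sj = format(j, '04b')
--         post.append(sj)
--         x.append(int(sj[0]))
--     return pre, post, x
-- ===== Notes on version B (the rewrite author's own statement) =====
-- stated objective: alternative
-- what changed: Replaces A's nested i/j loops over a prebuilt string table with a single flat loop over the cell index k = 0..len*len-1 that recovers the row and column by divmod(k, len) and formats each on the fly, with no intermediate il table.
import Mathlib
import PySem

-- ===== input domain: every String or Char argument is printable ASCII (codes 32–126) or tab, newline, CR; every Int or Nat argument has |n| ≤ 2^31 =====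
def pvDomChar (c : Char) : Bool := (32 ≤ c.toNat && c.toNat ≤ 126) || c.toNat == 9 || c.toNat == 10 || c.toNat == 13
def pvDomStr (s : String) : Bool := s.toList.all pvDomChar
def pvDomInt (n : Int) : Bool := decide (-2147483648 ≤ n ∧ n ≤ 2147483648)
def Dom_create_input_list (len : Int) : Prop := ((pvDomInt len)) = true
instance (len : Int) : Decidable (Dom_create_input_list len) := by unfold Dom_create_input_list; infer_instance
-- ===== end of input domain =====

-- B replaces A's nested i/j loops over a prebuilt table with one flat loop over the cell
-- index k, recovering row/column by divmod(k, len) (alternative decomposition, same cost).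


-- shared helpers of both ports:
-- Python's format(i, '04b') for i ≥ 0 (binary digits zero-padded to width 4),
-- exact via PySem.Int.toBinChars (= format(i,'b')) and PySem.Chars.zfill (= str.zfill)
def fmt04b (i : Int) : String := String.ofList (PySem.Chars.zfill (PySem.Int.toBinChars i) 4)

-- int(s[0]) / int(s[1]) for a string s (Python raises where pyGet?/ofChars? are none; never reached here)
def intAt0 (s : String) : Int := (PySem.Int.ofChars? [(PySem.Str.pyGet? s 0).getD ' ']).getD 0
def intAt1 (s : String) : Int := (PySem.Int.ofChars? [(PySem.Str.pyGet? s 1).getD ' ']).getD 0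

-- ===== PORT A =====
-- each Python append-in-loop is ported as cons onto an accumulator that is reversed once at
-- the end (the same list, built in linear instead of quadratic time); loops/branches unchanged
def create_input_list (len : Int) : List String × List String × List Int :=
  let il : List String :=
    ((PySem.List.pyRange 0 len 1).foldl (fun acc i => fmt04b i :: acc) []).reverse
  let st :=
    (PySem.List.pyRange 0 len 1).foldl (fun st i =>
      (PySem.List.pyRange 0 len 1).foldl (fun st j =>
        let _pre_a := intAt0 (PySem.List.pyGetD il i "")
        let _pre_b := intAt1 (PySem.List.pyGetD il i "")
        let post_a := intAt0 (PySem.List.pyGetD il j "")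
        let _post_b := intAt1 (PySem.List.pyGetD il j "")
        (PySem.List.pyGetD il i "" :: st.1,
         PySem.List.pyGetD il j "" :: st.2.1,
         post_a :: st.2.2)) st)
      (([], [], []) : List String × List String × List Int)
  (st.1.reverse, st.2.1.reverse, st.2.2.reverse)

-- ===== PORT B =====
-- Source B: one flat loop over k ∈ range(len*len); i, j = divmod(k, len); appends as cons +
-- one final reverse, as in A's port
def create_input_list_alt (len : Int) : List String × List String × List Int :=
  if len ≤ 0 then ([], [], [])
  else
    let st :=
      (PySem.List.pyRange 0 (len * len) 1).foldl (fun st k =>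
        let ij := (PySem.Int.divmod? k len).getD (0, 0)
        let sj := fmt04b ij.2
        (fmt04b ij.1 :: st.1, sj :: st.2.1, intAt0 sj :: st.2.2))
        (([], [], []) : List String × List String × List Int)
    (st.1.reverse, st.2.1.reverse, st.2.2.reverse)

-- ===== PRECONDITION & SPEC =====
def Spec_create_input_list (len : Int) (out : List String × List String × List Int) : Prop := out = create_input_list_alt len
instance (len : Int) (out : List String × List String × List Int) : Decidable (Spec_create_input_list len out) := by unfold Spec_create_input_list; infer_instance

-- ===== CLAIM (what is proved, stated in full; the proofs are below) =====
def Claim_equal_create_input_list : Prop := ∀ (len : Int), Dom_create_input_list len → Spec_create_input_list len (create_input_list len)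

-- ===== LEMMAS AND PROOFS =====

-- a cons-accumulated loop builds the reversed map
theorem foldl_cons_map {α β : Type} (f : α → β) (l : List α) (acc : List β) :
    l.foldl (fun acc x => f x :: acc) acc = (l.map f).reverse ++ acc := by
  induction l generalizing acc with
  | nil => simp
  | cons a t ih => simp [ih]

-- a loop keeping three cons-accumulators at once
theorem foldl_triple_cons {α β γ δ : Type} (l : List α) (f : α → β) (g : α → γ) (h : α → δ)
    (st : List β × List γ × List δ) :
    l.foldl (fun st x => (f x :: st.1, g x :: st.2.1, h x :: st.2.2)) st
      = ((l.map f).reverse ++ st.1, (l.map g).reverse ++ st.2.1, (l.map h).reverse ++ st.2.2) := by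
  induction l generalizing st with
  | nil => simp
  | cons a t ih => simp [ih]

-- A's outer loop: prepending one reversed chunk per row builds the reversed concatenation
theorem foldl_triple_chunks {α β γ δ : Type} (l : List α)
    (F : α → List β) (G : α → List γ) (H : α → List δ) (st : List β × List γ × List δ) :
    l.foldl (fun st x => ((F x).reverse ++ st.1, (G x).reverse ++ st.2.1, (H x).reverse ++ st.2.2)) st
      = ((l.map F).flatten.reverse ++ st.1, (l.map G).flatten.reverse ++ st.2.1,
         (l.map H).flatten.reverse ++ st.2.2) := by
  induction l generalizing st with
  | nil => simp
  | cons a t ih => simp [ih]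

-- a flat range of a*n elements, mapped, is the flatten of a rows of n
theorem range_mul_flatten {β : Type} (a n : Nat) (G : Nat → β) :
    (List.range (a * n)).map G
      = ((List.range a).map (fun i => (List.range n).map (fun j => G (i * n + j)))).flatten := by
  induction a with
  | zero => simp
  | succ a ih =>
    rw [Nat.succ_mul, List.range_add, List.map_append, ih, List.range_succ, List.map_append]
    simp [List.map_map, Function.comp_def]

-- divmod(i*n + j, n) = (i, j) for 0 ≤ j < n
theorem divmod_row_col (n i j : Nat) (hn : 0 < n) (hj : j < n) :
    PySem.Int.divmod? ((i * n + j : Nat) : Int) ((n : Nat) : Int) = some ((i : Int), (j : Int)) := by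
  have hne : ((n : Nat) : Int) ≠ 0 := by exact_mod_cast hn.ne'
  have h1 : ((i : Int) * n + j).fdiv n = i := by
    rw [Int.fdiv_eq_ediv, if_pos (Or.inl (by positivity)), sub_zero,
        add_comm, Int.add_mul_ediv_right _ _ hne,
        Int.ediv_eq_zero_of_lt (by positivity) (by exact_mod_cast hj)]
    simp
  have h2 : ((i : Int) * n + j).fmod n = j := by
    rw [Int.fmod_eq_emod, if_pos (Or.inl (by positivity)), add_zero,
        add_comm, mul_comm, Int.add_mul_emod_self_left]
    exact Int.emod_eq_of_lt (by positivity) (by exact_mod_cast hj)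
  simp [PySem.Int.divmod?]
  exact ⟨by omega, h1, by simpa using h2⟩

theorem main_eq (len : Int) : create_input_list len = create_input_list_alt len := by
  by_cases hle : len ≤ 0
  · unfold create_input_list create_input_list_alt
    rw [PySem.List.pyRange_one_eq_nil hle]
    simp [hle]
  · have hpos : 0 < len := by omega
    obtain ⟨n, rfl⟩ : ∃ n : Nat, len = (n : Int) := ⟨len.toNat, by omega⟩
    have hn : 0 < n := by exact_mod_cast hpos
    have hget : ∀ j : Int, 0 ≤ j → j < (n : Int) →
        PySem.List.pyGetD ((PySem.List.pyRange 0 (n : Int) 1).map fmt04b) j "" = fmt04b j :=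
      fun j h0 hj => PySem.List.pyGetD_map_pyRange_of_nonneg fmt04b (n : Int) j "" h0 hj
    unfold create_input_list create_input_list_alt
    rw [if_neg hle]
    simp only [foldl_cons_map, List.append_nil, List.reverse_reverse]
    -- reduce A to flattened maps
    rw [PySem.List.foldl_congr_mem _ _
          (fun st i =>
            ((((PySem.List.pyRange 0 (n : Int) 1).map
                (fun _ => PySem.List.pyGetD ((PySem.List.pyRange 0 (n : Int) 1).map fmt04b) i "")).reverse ++ st.1),
             (((PySem.List.pyRange 0 (n : Int) 1).map
                (fun j => PySem.List.pyGetD ((PySem.List.pyRange 0 (n : Int) 1).map fmt04b) j "")).reverse ++ st.2.1),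
             (((PySem.List.pyRange 0 (n : Int) 1).map
                (fun j => intAt0 (PySem.List.pyGetD ((PySem.List.pyRange 0 (n : Int) 1).map fmt04b) j ""))).reverse ++ st.2.2)))
          _ (fun st i _ => foldl_triple_cons _ _ _ _ st),
        foldl_triple_chunks,
        foldl_triple_cons]
    simp only [List.append_nil, List.reverse_reverse]
    have hr1 : PySem.List.pyRange 0 (n : Int) 1 = (List.range n).map (fun k => ((k : Nat) : Int)) := by
      rw [PySem.List.pyRange_one]
      simp
    have hr2 : PySem.List.pyRange 0 ((n : Int) * (n : Int)) 1
        = (List.range (n * n)).map (fun k => ((k : Nat) : Int)) := by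
      rw [PySem.List.pyRange_one]
      norm_num
      rw [show (((n : Int) * (n : Int)).toNat) = n * n by omega]
    simp only [hr1, List.map_map, Function.comp_def] at hget
    refine Prod.ext ?_ (Prod.ext ?_ ?_) <;>
      simp only [hr1, hr2, List.map_map, Function.comp_def, range_mul_flatten,
                 List.map_flatten] <;>
      (refine congrArg List.flatten (List.map_congr_left ?_)) <;>
      intro i hi <;> rw [List.mem_range] at hi <;>
      refine List.map_congr_left ?_ <;>
      intro j hj <;> rw [List.mem_range] at hj <;>
      rw [divmod_row_col n i j hn hj] <;>
      simp only [Option.getD_some] <;>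
      first
        | rw [hget (j : Int) (by positivity) (by exact_mod_cast hj)]
        | rw [hget (i : Int) (by positivity) (by exact_mod_cast hi)]

-- ===== VERDICT (by name: the statement is the Claim_ definition above) =====
theorem create_input_list_spec : Claim_equal_create_input_list := by
  intro len _
  unfold Spec_create_input_list
  exact main_eq len
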